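-- pv_equiv track=rewrite | github.com/Theomat/matching-pennies | interactive_plot.py | __find_metrics_for__
-- ===== SOURCE A (Python) =====
-- from typing import Any, Dict, List, Literal, Optional, Set, Tuple
--
-- StoredDataKey = Literal["data", "orientation", "type", "bins", "labels", "measure"]
--
-- def __find_metrics_for__(metrics: Dict[str, Dict[StoredDataKey, Any]], prefix: str) -> List[str]:
--     candidates = list(metrics.keys())
--     for i, l in enumerate(prefix):
--         candidates = [cand for cand in candidates if len(
--             cand) > i and cand[i] == l]
--         if len(candidates) == 1:
--             return candidates
--     return candidates
-- ===== SOURCE B (Python) =====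
-- def __find_metrics_for__(metrics, prefix):
--     keys = list(metrics.keys())
--
--     def matches(L):
--         p = prefix[:L]
--         return [k for k in keys if k[:L] == p]
--
--     # binary search the smallest L in [1, len(prefix)] whose match set has
--     # at most one element (the match count is non-increasing in L)
--     lo, hi, ans = 1, len(prefix), 0
--     while lo <= hi:
--         mid = (lo + hi) // 2
--         if len(matches(mid)) <= 1:
--             ans, hi = mid, mid - 1
--         else:
--             lo = mid + 1
--     if ans:
--         return matches(ans)
--     return matches(len(prefix))
-- ===== Notes on version B (the rewrite author's own statement) =====
-- stated objective: alternative
-- what changed: Instead of iteratively narrowing a candidate list character by character with an early return on a unique match, B binary-searches (using that the match count is non-increasing in the prefix length) for the smallest prefix length whose whole-prefix match set has at most one element and returns that match set, or the full-prefix matches if none.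
import Mathlib
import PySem

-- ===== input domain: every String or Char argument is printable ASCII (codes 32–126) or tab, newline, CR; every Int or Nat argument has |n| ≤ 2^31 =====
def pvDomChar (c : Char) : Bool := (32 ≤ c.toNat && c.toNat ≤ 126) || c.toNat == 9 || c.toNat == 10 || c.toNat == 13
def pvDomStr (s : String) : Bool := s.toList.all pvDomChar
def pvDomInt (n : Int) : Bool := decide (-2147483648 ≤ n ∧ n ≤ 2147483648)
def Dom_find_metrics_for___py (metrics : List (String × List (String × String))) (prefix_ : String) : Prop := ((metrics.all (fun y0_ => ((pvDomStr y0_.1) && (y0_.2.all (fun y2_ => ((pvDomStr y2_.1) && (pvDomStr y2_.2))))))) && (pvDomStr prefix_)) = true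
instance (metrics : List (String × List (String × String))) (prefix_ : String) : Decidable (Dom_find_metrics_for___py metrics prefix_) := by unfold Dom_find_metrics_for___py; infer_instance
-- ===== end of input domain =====

-- B replaces A's character-by-character candidate narrowing (early return on a unique match) by a
-- binary search for the smallest prefix length whose whole-prefix match set has at most one element
-- (alternative algorithm, similar cost).


-- ===== PORT A =====
-- the loop 'for i, l in enumerate(prefix): candidates = [...]; if len(candidates) == 1: return candidates'
def pvAGo (candidates : List String) : List (Int × Char) → List String
  | [] => candidates
  | (i, l) :: rest =>
      let candidates' := candidates.filter (fun cand =>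
        decide ((PySem.Str.len cand : Int) > i) && (PySem.Str.pyGet? cand i == some l))
      if candidates'.length = 1 then candidates' else pvAGo candidates' rest

def find_metrics_for___py (metrics : List (String × List (String × String))) (prefix_ : String) : List String :=
  let candidates := PySem.List.dedup (metrics.map (·.1))   -- list(metrics.keys())
  pvAGo candidates (PySem.List.enumerate prefix_.toList 0)

-- ===== PORT B =====
-- matches(L) = [k for k in keys if k[:L] == prefix[:L]]
def pvBMatches (keys : List String) (prefix_ : String) (L : Int) : List String :=
  let p := PySem.Str.slice prefix_ none (some L)
  keys.filter (fun k => PySem.Str.slice k none (some L) == p)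

-- the 'while lo <= hi' binary search for the smallest L with len(matches(L)) <= 1;
-- fuel = the initial interval size (hi + 1 - lo).toNat, a totality guard only: the interval
-- shrinks by at least one each iteration, so the fuel never runs out before lo > hi
def pvBSearch (keys : List String) (prefix_ : String) : Nat → Int → Int → Int → Int
  | 0, _, _, ans => ans
  | fuel+1, lo, hi, ans =>
    if lo ≤ hi then
      let mid := PySem.Int.floordiv (lo + hi) 2
      if (pvBMatches keys prefix_ mid).length ≤ 1 then
        pvBSearch keys prefix_ fuel lo (mid - 1) mid
      else
        pvBSearch keys prefix_ fuel (mid + 1) hi ans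
    else ans

def find_metrics_for___py_alt (metrics : List (String × List (String × String))) (prefix_ : String) : List String :=
  let keys := PySem.List.dedup (metrics.map (·.1))   -- list(metrics.keys())
  let ans := pvBSearch keys prefix_ (PySem.Str.len prefix_).toNat 1 (PySem.Str.len prefix_) 0
  if ans ≠ 0 then pvBMatches keys prefix_ ans
  else pvBMatches keys prefix_ (PySem.Str.len prefix_)

-- ===== PRECONDITION & SPEC =====
def Spec_find_metrics_for___py (metrics : List (String × List (String × String))) (prefix_ : String) (out : List String) : Prop := out = find_metrics_for___py_alt metrics prefix_
instance (metrics : List (String × List (String × String))) (prefix_ : String) (out : List String) : Decidable (Spec_find_metrics_for___py metrics prefix_ out) := by unfold Spec_find_metrics_for___py; infer_instance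

-- ===== CLAIM (what is proved, stated in full; the proofs are below) =====
def Claim_equal_find_metrics_for___py : Prop := ∀ (metrics : List (String × List (String × String))) (prefix_ : String), Dom_find_metrics_for___py metrics prefix_ → Spec_find_metrics_for___py metrics prefix_ (find_metrics_for___py metrics prefix_)

-- ===== LEMMAS AND PROOFS =====

-- proof-side: the match set at prefix length L (Nat form)
def pvM (keys : List String) (P : List Char) (L : Nat) : List String :=
  keys.filter (fun k => decide (k.toList.take L = P.take L))

-- proof-side: the recursion A's loop performs, on prefix positions
def pvARes (keys : List String) (P : List Char) (i : Nat) : List String :=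
  if i < P.length then
    (if (pvM keys P (i+1)).length = 1 then pvM keys P (i+1) else pvARes keys P (i+1))
  else pvM keys P i
termination_by P.length - i

-- take-prefix bookkeeping: one more matching character extends the matched prefix
theorem pv_step_iff (k P : List Char) (i : Nat) (hi : i < P.length) :
    ((i < k.length ∧ k[i]? = some P[i]) ∧ k.take i = P.take i) ↔ k.take (i+1) = P.take (i+1) := by
  constructor
  · rintro ⟨⟨h1, h2⟩, h3⟩
    rw [List.take_add_one, List.take_add_one, h3, h2, List.getElem?_eq_getElem hi]
  · intro h
    have hlenP : (P.take (i+1)).length = i+1 := by simp; omega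
    have hlenk : (k.take (i+1)).length = i+1 := by rw [h]; exact hlenP
    have hk : i < k.length := by simp at hlenk; omega
    refine ⟨⟨hk, ?_⟩, ?_⟩
    · have := congrArg (fun l => l[i]?) h
      simpa [List.getElem?_take, hi, hk] using this
    · have := congrArg (fun l => l.take i) h
      simpa [List.take_take] using this

theorem pvM_zero (keys : List String) (P : List Char) : pvM keys P 0 = keys := by
  simp [pvM]

-- A's per-character filter step, composed with the invariant, is the next match set
theorem pvM_filter_step (keys : List String) (P : List Char) (i : Nat) (hi : i < P.length) :
    (pvM keys P i).filter (fun cand =>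
        decide (PySem.Str.len cand > (i : Int)) && (PySem.Str.pyGet? cand (i : Int) == some P[i]))
      = pvM keys P (i+1) := by
  unfold pvM
  rw [List.filter_filter]
  apply List.filter_congr
  intro k _
  rw [Bool.eq_iff_iff]
  simp only [Bool.and_eq_true, decide_eq_true_eq, beq_iff_eq, PySem.Str.len_eq,
    PySem.Str.pyGet?_natCast]
  constructor
  · rintro ⟨⟨h1, h2⟩, h3⟩
    exact (pv_step_iff k.toList P i hi).1 ⟨⟨by exact_mod_cast h1, h2⟩, h3⟩
  · intro h
    obtain ⟨⟨h1, h2⟩, h3⟩ := (pv_step_iff k.toList P i hi).2 h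
    exact ⟨⟨by exact_mod_cast h1, h2⟩, h3⟩

-- the match set only shrinks as the prefix length grows
theorem pvM_mono (keys : List String) (P : List Char) {L L' : Nat} (h : L ≤ L') :
    pvM keys P L' = (pvM keys P L).filter (fun k => decide (k.toList.take L' = P.take L')) := by
  unfold pvM
  rw [List.filter_filter]
  apply List.filter_congr
  intro k _
  rw [Bool.eq_iff_iff]
  simp only [Bool.and_eq_true, decide_eq_true_eq]
  constructor
  · intro h1
    refine ⟨h1, ?_⟩
    have := congrArg (fun l => l.take L) h1
    simpa [List.take_take, Nat.min_eq_left h] using this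
  · exact fun h1 => h1.1

theorem pvM_len_antitone (keys : List String) (P : List Char) {L L' : Nat} (h : L ≤ L') :
    (pvM keys P L').length ≤ (pvM keys P L).length := by
  rw [pvM_mono keys P h]
  exact List.length_filter_le _ _

-- bridge: B's matches(L) is the match set at length L
theorem pvBMatches_eq (keys : List String) (prefix_ : String) (L : Int) (h : 0 ≤ L) :
    pvBMatches keys prefix_ L = pvM keys prefix_.toList L.toNat := by
  unfold pvBMatches pvM
  apply List.filter_congr
  intro k _
  rw [Bool.eq_iff_iff]
  simp only [beq_iff_eq, decide_eq_true_eq, ← String.toList_inj, PySem.Str.toList_slice,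
    PySem.Chars.slice_eq_listSlice]
  rw [PySem.List.slice_to _ h, PySem.List.slice_to _ h]

-- A's loop equals the pvARes recursion
theorem pvAGo_eq_pvARes (keys : List String) (P : List Char) :
    ∀ (xs : List Char) (i : Nat), xs = P.drop i →
      pvAGo (pvM keys P i) (PySem.List.enumerate xs (i : Int)) = pvARes keys P i := by
  intro xs
  induction xs with
  | nil =>
    intro i h
    have hlen : P.length ≤ i := by
      have := List.drop_eq_nil_iff.mp h.symm
      omega
    rw [pvARes]
    simp [pvAGo, PySem.List.enumerate, Nat.not_lt.mpr hlen]
  | cons c rest ih =>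
    intro i h
    have hi : i < P.length := by
      by_contra hc
      rw [List.drop_eq_nil_of_le (by omega)] at h
      simp at h
    have hdrop : P.drop i = P[i] :: P.drop (i+1) := List.drop_eq_getElem_cons hi
    rw [hdrop] at h
    have hc : c = P[i] := (List.cons.injEq _ _ _ _ ▸ h).1
    have hrest : rest = P.drop (i+1) := (List.cons.injEq _ _ _ _ ▸ h).2
    subst hc
    rw [PySem.List.enumerate_cons, pvAGo]
    have hcast : (i : Int) + 1 = ((i + 1 : Nat) : Int) := by push_cast; ring
    rw [pvM_filter_step keys P i hi, hcast, ih (i+1) hrest]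
    conv_rhs => rw [pvARes, if_pos hi]

-- binary-search correctness: returns 0 when no admissible length exists, else the least one
theorem pvBSearch_spec (keys : List String) (prefix_ : String) :
    ∀ (fuel : Nat) (lo hi ans : Int), (hi + 1 - lo).toNat ≤ fuel → 1 ≤ lo →
    hi ≤ (prefix_.toList.length : Int) →
    (∀ L : Int, 1 ≤ L → L < lo → ¬ ((pvM keys prefix_.toList L.toNat).length ≤ 1)) →
    ((ans = 0 ∧ hi = (prefix_.toList.length : Int)) ∨
          (1 ≤ ans ∧ ans ≤ (prefix_.toList.length : Int) ∧
            (pvM keys prefix_.toList ans.toNat).length ≤ 1 ∧ ans = hi + 1)) →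
    (pvBSearch keys prefix_ fuel lo hi ans = 0 ∧
       ∀ L : Int, 1 ≤ L → L ≤ (prefix_.toList.length : Int) →
         ¬ ((pvM keys prefix_.toList L.toNat).length ≤ 1)) ∨
    (1 ≤ pvBSearch keys prefix_ fuel lo hi ans ∧
       pvBSearch keys prefix_ fuel lo hi ans ≤ (prefix_.toList.length : Int) ∧
       (pvM keys prefix_.toList (pvBSearch keys prefix_ fuel lo hi ans).toNat).length ≤ 1 ∧
       ∀ L : Int, 1 ≤ L → L < pvBSearch keys prefix_ fuel lo hi ans →
         ¬ ((pvM keys prefix_.toList L.toNat).length ≤ 1)) := by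
  intro fuel
  induction fuel with
  | zero =>
    intro lo hi ans hf h1 h2 h3 h4
    rw [pvBSearch]
    rcases h4 with ⟨ha, hhi⟩ | ⟨ha1, ha2, hpred, hahi⟩
    · exact Or.inl ⟨ha, fun L hL1 hL2 => h3 L hL1 (by omega)⟩
    · exact Or.inr ⟨ha1, ha2, hpred, fun L hL1 hL2 => h3 L hL1 (by omega)⟩
  | succ fuel ih =>
    intro lo hi ans hf h1 h2 h3 h4
    rw [pvBSearch]
    by_cases hle : lo ≤ hi
    · rw [if_pos hle]
      have hmid := PySem.Int.floordiv_two_mid_bounds hle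
      have hmid0 : (0:Int) ≤ PySem.Int.floordiv (lo + hi) 2 := by omega
      by_cases hcond :
          (pvBMatches keys prefix_ (PySem.Int.floordiv (lo + hi) 2)).length ≤ 1
      · rw [if_pos hcond]
        rw [pvBMatches_eq keys prefix_ _ hmid0] at hcond
        exact ih lo (PySem.Int.floordiv (lo + hi) 2 - 1) _ (by omega) h1 (by omega) h3
          (Or.inr ⟨by omega, by omega, hcond, by ring⟩)
      · rw [if_neg hcond]
        rw [pvBMatches_eq keys prefix_ _ hmid0] at hcond
        refine ih _ hi ans (by omega) (by omega) h2 ?_ h4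
        intro L hL1 hLlt hpred
        by_cases hLlo : L < lo
        · exact h3 L hL1 hLlo hpred
        · apply hcond
          calc (pvM keys prefix_.toList (PySem.Int.floordiv (lo + hi) 2).toNat).length
              ≤ (pvM keys prefix_.toList L.toNat).length :=
                pvM_len_antitone keys prefix_.toList (by omega)
            _ ≤ 1 := hpred
    · rw [if_neg hle]
      rcases h4 with ⟨ha, hhi⟩ | ⟨ha1, ha2, hpred, hahi⟩
      · exact Or.inl ⟨ha, fun L hL1 hL2 => h3 L hL1 (by omega)⟩
      · exact Or.inr ⟨ha1, ha2, hpred, fun L hL1 hL2 => h3 L hL1 (by omega)⟩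

-- if no later match set is a singleton, A's loop runs to the end
theorem pvARes_noEarly (keys : List String) (P : List Char) :
    ∀ (d i : Nat), P.length - i ≤ d → i ≤ P.length →
      (∀ t : Nat, i < t → t ≤ P.length → (pvM keys P t).length ≠ 1) →
      pvARes keys P i = pvM keys P P.length := by
  intro d
  induction d with
  | zero =>
    intro i hd hi h
    have : i = P.length := by omega
    subst this
    rw [pvARes, if_neg (by omega)]
  | succ d ihd =>
    intro i hd hi h
    rw [pvARes]
    by_cases hlt : i < P.length
    · rw [if_pos hlt, if_neg (h (i+1) (by omega) (by omega))]
      exact ihd (i+1) (by omega) (by omega) (fun t ht1 ht2 => h t (by omega) ht2)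
    · rw [if_neg hlt]
      have : i = P.length := by omega
      rw [this]

-- if the first match set of size ≤ 1 is a singleton, A's loop returns it early
theorem pvARes_early (keys : List String) (P : List Char) (L0 : Nat)
    (hLN : L0 ≤ P.length)
    (hone : (pvM keys P L0).length = 1)
    (hmin : ∀ t : Nat, 1 ≤ t → t < L0 → (pvM keys P t).length ≠ 1) :
    ∀ (d i : Nat), L0 - i ≤ d → i < L0 → pvARes keys P i = pvM keys P L0 := by
  intro d
  induction d with
  | zero => intro i hd hi; omega
  | succ d ihd =>
    intro i hd hi
    rw [pvARes, if_pos (by omega)]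
    by_cases hL : i + 1 = L0
    · rw [hL, if_pos hone]
    · rw [if_neg (hmin (i+1) (by omega) (by omega))]
      exact ihd (i+1) (by omega) (by omega)

-- ===== VERDICT (by name: the statement is the Claim_ definition above) =====
theorem find_metrics_for___py_spec : Claim_equal_find_metrics_for___py := by
  intro metrics prefix_ _dom
  show find_metrics_for___py metrics prefix_ = find_metrics_for___py_alt metrics prefix_
  simp only [find_metrics_for___py, find_metrics_for___py_alt, PySem.Str.len_eq,
    Int.toNat_natCast]
  generalize PySem.List.dedup (metrics.map (·.1)) = keys
  have hA : pvAGo keys (PySem.List.enumerate prefix_.toList 0) = pvARes keys prefix_.toList 0 := by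
    simpa [pvM_zero] using pvAGo_eq_pvARes keys prefix_.toList prefix_.toList 0 (by simp)
  have hbs := pvBSearch_spec keys prefix_ prefix_.toList.length 1 (prefix_.toList.length : Int) 0
    (by omega) (by omega) (by omega) (by intro L hL1 hL2; omega) (Or.inl ⟨rfl, rfl⟩)
  rw [hA]
  rcases hbs with ⟨hr0, hnone⟩ | ⟨hr1, hr2, hpred, hminI⟩
  · -- no admissible length: both sides are the full-prefix match set
    rw [hr0, if_neg (by simp), pvBMatches_eq keys prefix_ _ (by omega)]
    simp only [Int.toNat_natCast]
    exact pvARes_noEarly keys prefix_.toList prefix_.toList.length 0 (by omega) (by omega)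
      (fun t ht1 ht2 => by
        have := hnone (t : Int) (by omega) (by omega)
        simp only [Int.toNat_natCast] at this
        omega)
  · -- least admissible length r: B returns the match set there
    rw [if_pos (by omega), pvBMatches_eq keys prefix_ _ (by omega)]
    have hmin : ∀ t : Nat, 1 ≤ t →
        t < (pvBSearch keys prefix_ prefix_.toList.length 1 (prefix_.toList.length : Int) 0).toNat →
        ¬ ((pvM keys prefix_.toList t).length ≤ 1) := by
      intro t ht1 ht2
      have := hminI (t : Int) (by omega) (by omega)
      simpa using this
    rcases Nat.lt_or_ge
      (pvM keys prefix_.toList (pvBSearch keys prefix_ prefix_.toList.length 1 (prefix_.toList.length : Int) 0).toNat).length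
      1 with hz | ho
    · -- empty match set: A also ends with the empty match set
      have hMN : (pvM keys prefix_.toList prefix_.toList.length).length = 0 := by
        have := pvM_len_antitone keys prefix_.toList
          (show (pvBSearch keys prefix_ prefix_.toList.length 1 (prefix_.toList.length : Int) 0).toNat
              ≤ prefix_.toList.length by omega)
        omega
      have hz0 : (pvM keys prefix_.toList
          (pvBSearch keys prefix_ prefix_.toList.length 1 (prefix_.toList.length : Int) 0).toNat).length = 0 := by omega
      rw [List.length_eq_zero_iff.mp hz0]
      rw [pvARes_noEarly keys prefix_.toList prefix_.toList.length 0 (by omega) (by omega)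
        (fun t ht1 ht2 => by
          by_cases hcmp : t < (pvBSearch keys prefix_ prefix_.toList.length 1 (prefix_.toList.length : Int) 0).toNat
          · exact fun hcon => hmin t (by omega) hcmp (by omega)
          · have := pvM_len_antitone keys prefix_.toList (Nat.le_of_not_lt hcmp)
            omega)]
      exact List.length_eq_zero_iff.mp (by omega)
    · -- singleton match set: A returns it early
      exact pvARes_early keys prefix_.toList _ (by omega) (by omega)
        (fun t ht1 ht2 => by have := hmin t ht1 ht2; omega)
        (pvBSearch keys prefix_ prefix_.toList.length 1 (prefix_.toList.length : Int) 0).toNat 0 (by omega) (by omega)
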